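-- pv_equiv track=rewrite | github.com/soodal5629/codingTestProblemSolve | 백준5567.py | bfs
-- ===== SOURCE A (Python) =====
-- from collections import deque
--
-- def bfs(g, n):
--   v = [False] * (n+1)
--   v[1] = True
--   d = deque()
--   d.append((1, 0))
--   res = 0
--   while d:
--     now, cnt = d.popleft()
--     for i in g[now]:
--       if v[i]==False:
--         d.append((i, cnt+1))
--         v[i] = True
--         if cnt+1 < 3: res+=1
--   return res
-- ===== SOURCE B (Python) =====
-- def bfs(g, n):
--     # Level-synchronized BFS: expand exactly two frontiers from node 1,
--     # counting each newly marked node; no deque, no (node, distance) tuples,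
--     # and no exploration beyond the second level.
--     v = [False] * (n + 1)
--     v[1] = True
--     frontier = [1]
--     res = 0
--     for _ in range(2):
--         nxt = []
--         for now in frontier:
--             for i in g[now]:
--                 if not v[i]:
--                     v[i] = True
--                     nxt.append(i)
--                     res += 1
--         frontier = nxt
--     return res
-- ===== Notes on version B (the rewrite author's own statement) =====
-- stated objective: simpler
-- what changed: Replaced the (node, distance)-tagged deque BFS that keeps exploring the whole graph with a level-synchronized BFS that expands exactly two frontiers from node 1 and stops, dropping the deque, the distance tuples and the 'cnt+1 < 3' comparison.
-- outside the precondition, e.g. on bfs([[113, -1], [-1]], 3): A returns 1, B returns 1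
import Mathlib
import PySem

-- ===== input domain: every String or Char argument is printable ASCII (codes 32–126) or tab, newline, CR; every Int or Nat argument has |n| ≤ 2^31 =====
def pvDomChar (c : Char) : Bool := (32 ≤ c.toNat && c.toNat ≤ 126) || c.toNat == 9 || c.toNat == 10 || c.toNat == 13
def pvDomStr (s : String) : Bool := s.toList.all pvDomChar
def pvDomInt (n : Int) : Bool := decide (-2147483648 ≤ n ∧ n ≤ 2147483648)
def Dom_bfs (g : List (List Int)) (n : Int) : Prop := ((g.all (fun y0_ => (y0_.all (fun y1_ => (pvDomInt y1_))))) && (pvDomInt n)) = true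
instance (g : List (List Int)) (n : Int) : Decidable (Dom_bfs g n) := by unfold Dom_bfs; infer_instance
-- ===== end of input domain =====

-- B replaces A's (node,distance)-tagged deque BFS over the whole graph by a level-synchronized
-- BFS that expands exactly two frontiers from node 1 and counts newly marked nodes (objective: simpler).


-- ===== PORT A =====
-- inner 'for i in g[now]' loop of A; state = (v, d, res)
def pvFoldRow (row : List Int) (cnt : Int) (st : List Bool × List (Int × Int) × Int) :
    List Bool × List (Int × Int) × Int :=
  row.foldl (fun st i =>
    match PySem.List.pyGet? st.1 i with
    | none => st   -- Python raises IndexError here; such inputs are outside Pre_bfs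
    | some b =>
      if b = false then
        (PySem.List.pySetD st.1 i true, st.2.1 ++ [(i, cnt + 1)],
         if cnt + 1 < 3 then st.2.2 + 1 else st.2.2)
      else st) st

-- the 'while d' loop of A; fuel bounds the number of pops ((n+1) slots + total edges + 2 suffices)
def bfsLoop (g : List (List Int)) : Nat → List Bool → List (Int × Int) → Int → Int
  | 0, _, _, res => res
  | _ + 1, _, [], res => res
  | fuel + 1, v, (now, cnt) :: rest, res =>
    match PySem.List.pyGet? g now with
    | none => res   -- Python raises IndexError here; such inputs are outside Pre_bfs
    | some row =>
      let st := pvFoldRow row cnt (v, rest, res)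
      bfsLoop g fuel st.1 st.2.1 st.2.2

def bfs (g : List (List Int)) (n : Int) : Int :=
  let v := List.replicate (n + 1).toNat false
  let v := PySem.List.pySetD v 1 true   -- v[1] = True (IndexError when n < 1: outside Pre_bfs)
  bfsLoop g ((n + 1).toNat + g.flatten.length + 2) v [(1, 0)] 0

-- ===== PORT B =====
def bfs_alt (g : List (List Int)) (n : Int) : Int :=
  let v := List.replicate (n + 1).toNat false
  let v := PySem.List.pySetD v 1 true   -- v[1] = True (IndexError when n < 1: outside Pre_bfs)
  ((List.range 2).foldl (fun (st : List Bool × List Int × Int) _ =>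
      st.2.1.foldl (fun (st2 : List Bool × List Int × Int) now =>
        ((PySem.List.pyGet? g now).getD []).foldl   -- g[now]: IndexError outside Pre_bfs
          (fun (st3 : List Bool × List Int × Int) i =>
            match PySem.List.pyGet? st3.1 i with
            | none => st3   -- v[i]: IndexError outside Pre_bfs
            | some b =>
              if b = false then
                (PySem.List.pySetD st3.1 i true, st3.2.1 ++ [i], st3.2.2 + 1)
              else st3) st2)
        (st.1, [], st.2.2))
      (v, [1], 0)).2.2

-- ===== PRECONDITION & SPEC =====
-- Pre_bfs keeps n ≥ 1, a row for node 1, and either node 1 has no neighbours (A reads nothing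
-- else) or every listed neighbour is a valid (possibly negative, Python-wraparound) index into
-- both g and the visited list, so A can never raise; outside it A raises IndexError or returns
-- only because the out-of-range entries sit in rows its traversal happens never to reach — a
-- reachability fact no closed-form condition on the input can state.
def Pre_bfs (g : List (List Int)) (n : Int) : Prop :=
  1 ≤ n ∧ 2 ≤ (g.length : Int) ∧
    (g[1]? = some ([] : List Int) ∨
      ∀ row ∈ g, ∀ i ∈ row,
        PySem.Raise.InRange g.length i ∧ PySem.Raise.InRange (n + 1).toNat i)
instance (g : List (List Int)) (n : Int) : Decidable (Pre_bfs g n) := by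
  unfold Pre_bfs; infer_instance

def pvWitness_bfs : List (List Int) × Int := ([[], [2, 0], [1]], 2)

def Spec_bfs (g : List (List Int)) (n : Int) (out : Int) : Prop := out = bfs_alt g n
instance (g : List (List Int)) (n : Int) (out : Int) : Decidable (Spec_bfs g n out) := by
  unfold Spec_bfs; infer_instance

-- ===== CLAIM (what is proved, stated in full; the proofs are below) =====
def Claim_equal_bfs : Prop :=
  ∀ (g : List (List Int)) (n : Int), Dom_bfs g n → Pre_bfs g n → Spec_bfs g n (bfs g n)

-- ===== LEMMAS AND PROOFS =====

-- proof-side description of expanding one adjacency row: new visited array and newly found nodes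
def pvExpand (v : List Bool) (row : List Int) : List Bool × List Int :=
  match row with
  | [] => (v, [])
  | i :: rest =>
    match PySem.List.pyGet? v i with
    | some false =>
      let r := pvExpand (PySem.List.pySetD v i true) rest
      (r.1, i :: r.2)
    | _ => pvExpand v rest

-- expanding a whole frontier
def pvExpandF (g : List (List Int)) (v : List Bool) (f : List Int) : List Bool × List Int :=
  match f with
  | [] => (v, [])
  | a :: t =>
    let r := pvExpand v ((PySem.List.pyGet? g a).getD [])
    let s := pvExpandF g r.1 t
    (s.1, r.2 ++ s.2)

lemma pvExpand_mem (v : List Bool) (row : List Int) :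
    ∀ x ∈ (pvExpand v row).2, x ∈ row := by
  induction row generalizing v with
  | nil => simp [pvExpand]
  | cons i rest ih =>
    unfold pvExpand
    rcases h : PySem.List.pyGet? v i with _ | b
    · intro x hx; exact List.mem_cons_of_mem _ (ih v x hx)
    · cases b
      · intro x hx
        rcases List.mem_cons.mp hx with rfl | hx
        · exact List.mem_cons_self
        · exact List.mem_cons_of_mem _ (ih _ x hx)
      · intro x hx; exact List.mem_cons_of_mem _ (ih v x hx)

lemma pvExpand_len2 (v : List Bool) (row : List Int) :
    (pvExpand v row).2.length ≤ row.length := by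
  induction row generalizing v with
  | nil => simp [pvExpand]
  | cons i rest ih =>
    unfold pvExpand
    rcases h : PySem.List.pyGet? v i with _ | b
    · exact le_trans (ih v) (by simp)
    · cases b
      · simpa using ih (PySem.List.pySetD v i true)
      · exact le_trans (ih v) (by simp)

-- A's inner row loop computed by pvExpand
lemma pvFoldRow_eq (row : List Int) (cnt : Int) (hcnt : cnt + 1 < 3) :
    ∀ (v : List Bool) (d : List (Int × Int)) (res : Int),
      pvFoldRow row cnt (v, d, res)
        = ((pvExpand v row).1, d ++ (pvExpand v row).2.map (fun i => (i, cnt + 1)),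
           res + ((pvExpand v row).2.length : Int)) := by
  induction row with
  | nil => intro v d res; simp [pvFoldRow, pvExpand]
  | cons i rest ih =>
    intro v d res
    rcases hget : PySem.List.pyGet? v i with _ | b
    · have h1 : pvFoldRow (i :: rest) cnt (v, d, res) = pvFoldRow rest cnt (v, d, res) := by
        simp [pvFoldRow, hget]
      have h2 : pvExpand v (i :: rest) = pvExpand v rest := by
        simp [pvExpand, hget]
      rw [h1, ih, h2]
    · cases b
      · have h1 : pvFoldRow (i :: rest) cnt (v, d, res)
            = pvFoldRow rest cnt
                (PySem.List.pySetD v i true, d ++ [(i, cnt + 1)], res + 1) := by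
          simp [pvFoldRow, hget, hcnt]
        have h2 : pvExpand v (i :: rest)
            = ((pvExpand (PySem.List.pySetD v i true) rest).1,
               i :: (pvExpand (PySem.List.pySetD v i true) rest).2) := by
          simp [pvExpand, hget]
        rw [h1, ih, h2]
        simp only [List.map_cons, List.length_cons, Prod.mk.injEq]
        exact ⟨trivial, by simp [List.append_assoc], by push_cast; ring⟩
      · have h1 : pvFoldRow (i :: rest) cnt (v, d, res) = pvFoldRow rest cnt (v, d, res) := by
          simp [pvFoldRow, hget]
        have h2 : pvExpand v (i :: rest) = pvExpand v rest := by
          simp [pvExpand, hget]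
        rw [h1, ih, h2]

-- A's loop on a deque whose every entry has distance ≥ 2 never changes res
lemma pvFoldRow_deep (row : List Int) (cnt : Int) (hcnt : 2 ≤ cnt) :
    ∀ (v : List Bool) (d : List (Int × Int)) (res : Int),
      (pvFoldRow row cnt (v, d, res)).2.2 = res ∧
      (∀ p ∈ (pvFoldRow row cnt (v, d, res)).2.1, p ∈ d ∨ p.2 = cnt + 1) := by
  induction row with
  | nil => intro v d res; exact ⟨rfl, fun p hp => Or.inl hp⟩
  | cons i rest ih =>
    intro v d res
    rcases h : PySem.List.pyGet? v i with _ | b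
    · have h1 : pvFoldRow (i :: rest) cnt (v, d, res) = pvFoldRow rest cnt (v, d, res) := by
        simp [pvFoldRow, h]
      rw [h1]; exact ih v d res
    · cases b
      · have h1 : pvFoldRow (i :: rest) cnt (v, d, res)
            = pvFoldRow rest cnt (PySem.List.pySetD v i true, d ++ [(i, cnt + 1)], res) := by
          simp [pvFoldRow, h, if_neg (by omega : ¬ cnt + 1 < 3)]
        rw [h1]
        refine ⟨(ih _ _ _).1, fun p hp => ?_⟩
        rcases (ih _ _ _).2 p hp with hm | he
        · rcases List.mem_append.mp hm with hm | hm
          · exact Or.inl hm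
          · simp at hm; right; simp [hm]
        · exact Or.inr he
      · have h1 : pvFoldRow (i :: rest) cnt (v, d, res) = pvFoldRow rest cnt (v, d, res) := by
          simp [pvFoldRow, h]
        rw [h1]; exact ih v d res

lemma bfsLoop_deep (g : List (List Int)) :
    ∀ (fuel : Nat) (d : List (Int × Int)) (v : List Bool) (res : Int),
      (∀ p ∈ d, 2 ≤ p.2) → bfsLoop g fuel v d res = res := by
  intro fuel
  induction fuel with
  | zero => intro d v res _; rfl
  | succ fuel ih =>
    intro d v res hd
    cases d with
    | nil => rfl
    | cons p rest =>
      obtain ⟨now, cnt⟩ := p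
      have hcnt : 2 ≤ cnt := hd (now, cnt) List.mem_cons_self
      rcases hg : PySem.List.pyGet? g now with _ | row
      · simp [bfsLoop, hg]
      · have hfold := pvFoldRow_deep row cnt hcnt v rest res
        have h1 : bfsLoop g (fuel + 1) v ((now, cnt) :: rest) res
            = bfsLoop g fuel (pvFoldRow row cnt (v, rest, res)).1
                (pvFoldRow row cnt (v, rest, res)).2.1
                (pvFoldRow row cnt (v, rest, res)).2.2 := by
          simp [bfsLoop, hg]
        rw [h1, hfold.1, ih _ _ _ ?_]
        intro p hp
        rcases hfold.2 p hp with hm | he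
        · exact hd p (List.mem_cons_of_mem _ hm)
        · omega

-- A's loop expands one whole level (distance c < 2) exactly as pvExpandF does
lemma bfsLoop_level (g : List (List Int)) (c : Int) (hc : c = 0 ∨ c = 1) :
    ∀ (f1 : List Int) (fuel : Nat) (v : List Bool) (f2 : List Int) (res : Int),
      (∀ a ∈ f1, PySem.Raise.InRange g.length a) →
      bfsLoop g (f1.length + fuel) v
          (f1.map (fun a => (a, c)) ++ f2.map (fun a => (a, c + 1))) res
        = bfsLoop g fuel (pvExpandF g v f1).1
            ((f2 ++ (pvExpandF g v f1).2).map (fun a => (a, c + 1)))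
            (res + ((pvExpandF g v f1).2.length : Int)) := by
  intro f1
  induction f1 with
  | nil => intro fuel v f2 res _; simp [pvExpandF]
  | cons a t ih =>
    intro fuel v f2 res hf
    have ha := hf a List.mem_cons_self
    obtain ⟨row, hget⟩ : ∃ row, PySem.List.pyGet? g a = some row := by
      rcases h : PySem.List.pyGet? g a with _ | row
      · exact absurd ((PySem.List.pyGet?_eq_none_iff g a).mp h) (by simpa using ha)
      · exact ⟨row, rfl⟩
    have hgetD : (PySem.List.pyGet? g a).getD [] = row := by rw [hget]; rfl
    have hstep : (a :: t).length + fuel = (t.length + fuel) + 1 := by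
      simp [Nat.add_right_comm]
    rw [hstep]
    set nw := (pvExpand v row).2 with hnw
    set v1 := (pvExpand v row).1 with hv1
    have h1 : bfsLoop g ((t.length + fuel) + 1) v
        ((a :: t).map (fun x => (x, c)) ++ f2.map (fun x => (x, c + 1))) res
        = bfsLoop g (t.length + fuel)
            (pvFoldRow row c (v, t.map (fun x => (x, c)) ++ f2.map (fun x => (x, c + 1)), res)).1
            (pvFoldRow row c (v, t.map (fun x => (x, c)) ++ f2.map (fun x => (x, c + 1)), res)).2.1
            (pvFoldRow row c (v, t.map (fun x => (x, c)) ++ f2.map (fun x => (x, c + 1)), res)).2.2 := by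
      simp [bfsLoop, hget]
    rw [h1, pvFoldRow_eq _ c (by omega) v _ res]
    have hrw : (t.map (fun x => (x, c)) ++ f2.map (fun x => (x, c + 1)))
        ++ nw.map (fun i => (i, c + 1))
        = t.map (fun x => (x, c)) ++ (f2 ++ nw).map (fun x => (x, c + 1)) := by
      simp [List.map_append, List.append_assoc]
    rw [hrw]
    rw [ih fuel v1 (f2 ++ nw) (res + (nw.length : Int))
          (fun x hx => hf x (List.mem_cons_of_mem _ hx))]
    set rE := pvExpandF g v1 t with hrE
    have hEF : pvExpandF g v (a :: t) = (rE.1, nw ++ rE.2) := by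
      rw [pvExpandF, hgetD]
    rw [hEF]
    have hD : f2 ++ (nw ++ rE.2) = (f2 ++ nw) ++ rE.2 := (List.append_assoc _ _ _).symm
    have hR : res + (((nw ++ rE.2).length : Nat) : Int)
        = res + (nw.length : Int) + (rE.2.length : Int) := by
      push_cast [List.length_append]; ring
    rw [hD, hR]

-- B's inner row loop computed by pvExpand
lemma bRow_eq (row : List Int) :
    ∀ (v : List Bool) (nxt : List Int) (res : Int),
      row.foldl (fun (st3 : List Bool × List Int × Int) i =>
          match PySem.List.pyGet? st3.1 i with
          | none => st3
          | some b =>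
            if b = false then
              (PySem.List.pySetD st3.1 i true, st3.2.1 ++ [i], st3.2.2 + 1)
            else st3) (v, nxt, res)
        = ((pvExpand v row).1, nxt ++ (pvExpand v row).2,
           res + ((pvExpand v row).2.length : Int)) := by
  induction row with
  | nil => intro v nxt res; simp [pvExpand]
  | cons i rest ih =>
    intro v nxt res
    simp only [List.foldl_cons]
    rcases hget : PySem.List.pyGet? v i with _ | b
    · have h2 : pvExpand v (i :: rest) = pvExpand v rest := by
        simp [pvExpand, hget]
      rw [h2, ← ih v nxt res]
    · cases b
      · have h2 : pvExpand v (i :: rest)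
            = ((pvExpand (PySem.List.pySetD v i true) rest).1,
               i :: (pvExpand (PySem.List.pySetD v i true) rest).2) := by
          simp [pvExpand, hget]
        rw [h2]
        simp only [if_true]
        rw [ih (PySem.List.pySetD v i true) (nxt ++ [i]) (res + 1)]
        simp only [Prod.mk.injEq, List.length_cons]
        exact ⟨trivial, by simp [List.append_assoc], by push_cast; ring⟩
      · have h2 : pvExpand v (i :: rest) = pvExpand v rest := by
          simp [pvExpand, hget]
        rw [h2, ← ih v nxt res]
        simp

-- B's frontier loop computed by pvExpandF
lemma bFrontier_eq (g : List (List Int)) :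
    ∀ (f : List Int) (v : List Bool) (nxt : List Int) (res : Int),
      f.foldl (fun (st2 : List Bool × List Int × Int) now =>
          ((PySem.List.pyGet? g now).getD []).foldl
            (fun (st3 : List Bool × List Int × Int) i =>
              match PySem.List.pyGet? st3.1 i with
              | none => st3
              | some b =>
                if b = false then
                  (PySem.List.pySetD st3.1 i true, st3.2.1 ++ [i], st3.2.2 + 1)
                else st3) st2) (v, nxt, res)
        = ((pvExpandF g v f).1, nxt ++ (pvExpandF g v f).2,
           res + ((pvExpandF g v f).2.length : Int)) := by
  intro f
  induction f with
  | nil => intro v nxt res; simp [pvExpandF]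
  | cons a t ih =>
    intro v nxt res
    simp only [List.foldl_cons]
    rw [bRow_eq]
    rw [ih]
    have hEF : pvExpandF g v (a :: t)
        = ((pvExpandF g (pvExpand v ((PySem.List.pyGet? g a).getD [])).1 t).1,
           (pvExpand v ((PySem.List.pyGet? g a).getD [])).2
             ++ (pvExpandF g (pvExpand v ((PySem.List.pyGet? g a).getD [])).1 t).2) := by
      rw [pvExpandF]
    rw [hEF]
    simp only [Prod.mk.injEq]
    refine ⟨trivial, by simp [List.append_assoc], by push_cast [List.length_append]; ring⟩

lemma mem_length_le_flatten {α : Type} (g : List (List α)) (l : List α) (h : l ∈ g) :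
    l.length ≤ g.flatten.length := by
  induction g with
  | nil => simp at h
  | cons x xs ih =>
    rcases List.mem_cons.mp h with rfl | h
    · simp
    · have := ih h
      simp only [List.flatten_cons, List.length_append]
      omega

-- ===== VERDICT (by name: the statement is the Claim_ definition above) =====
theorem bfs_spec : Claim_equal_bfs := by
  intro g n _ hpre
  obtain ⟨hn, hlen, hsafe⟩ := hpre
  unfold Spec_bfs
  set v0 := PySem.List.pySetD (List.replicate (n + 1).toNat false) 1 true with hv0
  have hg1 : (1 : Int) < (g.length : Int) := by omega
  have hf1 : ∀ a ∈ [(1 : Int)], PySem.Raise.InRange g.length a := by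
    intro a ha
    have : a = 1 := by simpa using ha
    subst this
    constructor <;> [omega; exact hg1]
  have hget1 : PySem.List.pyGet? g 1 = some (g[(1 : Int).toNat]'(by omega)) :=
    PySem.List.pyGet?_eq_some_getElem g (by norm_num) hg1
  set row1 := g[(1 : Int).toNat]'(by omega) with hrow1
  have hrow1mem : row1 ∈ g := List.getElem_mem _
  have hgetD1 : (PySem.List.pyGet? g 1).getD [] = row1 := by rw [hget1]; rfl
  set E1 := pvExpandF g v0 [1] with hE1
  set E2 := pvExpandF g E1.1 E1.2 with hE2
  have hE1eq : E1 = ((pvExpand v0 row1).1, (pvExpand v0 row1).2 ++ []) := by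
    rw [hE1, pvExpandF, hgetD1]; rfl
  have hE11 : E1.1 = (pvExpand v0 row1).1 := by rw [hE1eq]
  have hE12 : E1.2 = (pvExpand v0 row1).2 := by rw [hE1eq]; simp
  have hE1len : E1.2.length ≤ g.flatten.length := by
    rw [hE12]
    exact le_trans (pvExpand_len2 v0 row1) (mem_length_le_flatten g row1 hrow1mem)
  have hfE1 : ∀ a ∈ E1.2, PySem.Raise.InRange g.length a := by
    intro a ha
    rw [hE12] at ha
    have hmem : a ∈ row1 := pvExpand_mem v0 row1 a ha
    rcases hsafe with hnil | hall
    · -- node 1 has no neighbours: row1 = [] and the claim is vacuous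
      have : row1 = [] := by
        have : g[1]? = some row1 := by
          rw [hrow1]
          simp
        exact Option.some_injective _ (this.symm.trans hnil)
      rw [this] at hmem
      simp at hmem
    · exact (hall row1 hrow1mem a hmem).1
  -- A side
  have hA : bfs g n = (E1.2.length : Int) + (E2.2.length : Int) := by
    have h0 : bfs g n
        = bfsLoop g ((n + 1).toNat + g.flatten.length + 2) v0 [(1, 0)] 0 := rfl
    rw [h0]
    rw [show (n + 1).toNat + g.flatten.length + 2
        = [(1 : Int)].length + ((n + 1).toNat + g.flatten.length + 1) by simp; omega]
    rw [show [((1 : Int), (0 : Int))]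
        = [(1 : Int)].map (fun a => (a, (0 : Int)))
          ++ ([] : List Int).map (fun a => (a, (0 : Int) + 1)) by simp]
    rw [bfsLoop_level g 0 (Or.inl rfl) [1] ((n + 1).toNat + g.flatten.length + 1) v0 [] 0 hf1]
    rw [← hE1]
    simp only [List.nil_append, zero_add]
    rw [show (n + 1).toNat + g.flatten.length + 1
        = E1.2.length + ((n + 1).toNat + g.flatten.length + 1 - E1.2.length) by omega]
    rw [show E1.2.map (fun a => (a, (1 : Int)))
        = E1.2.map (fun a => (a, (1 : Int)))
          ++ ([] : List Int).map (fun a => (a, (1 : Int) + 1)) by simp]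
    rw [bfsLoop_level g 1 (Or.inr rfl) E1.2
        ((n + 1).toNat + g.flatten.length + 1 - E1.2.length) E1.1 []
        ((E1.2.length : Int)) hfE1]
    rw [← hE2]
    rw [bfsLoop_deep g _ _ _ _ ?_]
    intro p hp
    simp only [List.nil_append, List.mem_map] at hp
    obtain ⟨a, _, rfl⟩ := hp
    norm_num
  -- B side
  have hB : bfs_alt g n = (0 + (E1.2.length : Int)) + (E2.2.length : Int) := by
    have h0 : List.range 2 = [0, 1] := rfl
    unfold bfs_alt
    rw [h0]
    simp only [List.foldl_cons, List.foldl_nil]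
    rw [← hv0, hgetD1]
    rw [bRow_eq row1 v0 [] 0]
    simp only [List.nil_append]
    rw [← hE11, ← hE12]
    rw [bFrontier_eq g E1.2 E1.1 [] (0 + (E1.2.length : Int))]
  rw [hA, hB]
  ring
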